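-- pv_equiv track=rewrite | github.com/ahoque1999/competitive_programming | reverse_string.py | return_possible_candidates
-- ===== SOURCE A (Python) =====
-- def return_possible_candidates(t):
--     candidates = []
--     n = len(t)
--     for i in range(n):
--         check = min([i - 0, n - 1 - i])
--         left = t[i - check: i]
--         right = t[i + 1: i + 1 + check][::-1]
--         if left == right:
--             if n - 1 - i > i - 0:
--                 candidate = t[i:n][::-1]
--             else:
--                 candidate = t[0:i + 1]
--             candidates.append(candidate)
--     return candidates
-- ===== SOURCE B (Python) =====
-- def _zarray(s):
--     # z[i] = length of the longest common prefix of s and s[i:]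
--     n = len(s)
--     z = [0] * n
--     l = r = 0
--     for i in range(1, n):
--         zi = min(r - i, z[i - l]) if i < r else 0
--         while i + zi < n and s[zi] == s[i + zi]:
--             zi += 1
--         z[i] = zi
--         if i + zi > r:
--             l, r = i, i + zi
--     return z
--
--
-- def return_possible_candidates(t):
--     n = len(t)
--     r = t[::-1]
--     zp = _zarray(t + r)  # zp[2n-L] == L  <=>  t[:L] is a palindrome
--     zs = _zarray(r + t)  # zs[2n-L] == L  <=>  t[n-L:] is a palindrome
--     out = []
--     for i in range(n):
--         if i < n - 1 - i:
--             L = 2 * i + 1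
--             if zp[2 * n - L] == L:
--                 out.append(r[:n - i])
--         else:
--             L = 2 * (n - 1 - i) + 1
--             if zs[2 * n - L] == L:
--                 out.append(t[:i + 1])
--     return out
-- ===== Notes on version B (the rewrite author's own statement) =====
-- stated objective: faster
-- what changed: B replaces A's per-center half-window slice comparison (O(n) slice/reverse work per center) by two linear-time Z-arrays of t+rev(t) and rev(t)+t, reading each center's boundary-reaching palindrome test off in O(1); intended as faster (test phase O(n) vs O(n^2)) — a timing run measured 1.85x at n=16384, the largest size both finished, since building the returned candidate strings is itself Theta(total output size) for both.
import Mathlib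
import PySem

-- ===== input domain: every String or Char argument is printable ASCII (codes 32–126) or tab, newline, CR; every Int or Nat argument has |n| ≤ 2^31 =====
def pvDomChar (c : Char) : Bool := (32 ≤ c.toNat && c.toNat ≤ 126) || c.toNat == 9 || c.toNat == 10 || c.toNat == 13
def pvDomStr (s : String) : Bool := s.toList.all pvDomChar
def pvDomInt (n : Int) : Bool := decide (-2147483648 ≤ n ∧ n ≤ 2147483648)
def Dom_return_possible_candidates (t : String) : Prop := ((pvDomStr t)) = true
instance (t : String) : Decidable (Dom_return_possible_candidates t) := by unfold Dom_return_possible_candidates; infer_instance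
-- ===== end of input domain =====

-- B replaces A's quadratic per-center slice comparison by two linear-time Z-arrays of t++rev(t)
-- and rev(t)++t, reading each center's boundary-reaching palindrome test off in O(1); objective:
-- intended as faster (a timing run measured 1.85x at the largest size both versions finished).

-- ===== PORT A =====
-- literal transliteration of Source A; t[x:y] = PySem slice on t.toList, [::-1] = List.reverse
-- (PySem.List.slice?_none_none_neg_one), min([x, y]) of a two-element list = binary min
def return_possible_candidates (t : String) : List String :=
  let l := t.toList
  let n : Int := l.length
  (PySem.List.pyRange 0 n 1).foldl (fun candidates i =>
    let check := min (i - 0) (n - 1 - i)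
    let left := PySem.List.slice l (some (i - check)) (some i)
    let right := (PySem.List.slice l (some (i + 1)) (some (i + 1 + check))).reverse
    if left = right then
      let candidate := if n - 1 - i > i - 0 then (PySem.List.slice l (some i) (some n)).reverse
                       else PySem.List.slice l (some 0) (some (i + 1))
      candidates ++ [String.ofList candidate]
    else candidates) []

-- ===== PORT B =====
-- the while loop of _zarray, as structural recursion on n - (i + zi); every index it reads is
-- in range at B's calls, so the total indexing form pyGetD is exact here
def pvZwhile (s : List Char) (n i zi : Int) : Int :=
  if h : i + zi < n ∧ PySem.List.pyGetD s zi ' ' = PySem.List.pyGetD s (i + zi) ' ' then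
    pvZwhile s n i (zi + 1)
  else zi
termination_by (n - (i + zi)).toNat
decreasing_by omega

-- the body of _zarray's for loop; state (z, l, r)
def pvZbody (s : List Char) (n : Int) (st : List Int × Int × Int) (i : Int) : List Int × Int × Int :=
  let zi0 : Int := if i < st.2.2 then min (st.2.2 - i) (PySem.List.pyGetD st.1 (i - st.2.1) 0) else 0
  let zi := pvZwhile s n i zi0
  let z' := PySem.List.pySetD st.1 i zi
  if i + zi > st.2.2 then (z', i, i + zi) else (z', st.2.1, st.2.2)

-- _zarray(s): [0]*n = List.replicate, the for loop over range(1, n) as a foldl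
def pvZarray (s : List Char) : List Int :=
  let n : Int := s.length
  ((PySem.List.pyRange 1 n 1).foldl (pvZbody s n) (List.replicate s.length 0, 0, 0)).1

def return_possible_candidates_alt (t : String) : List String :=
  let l := t.toList
  let n : Int := l.length
  let r := l.reverse
  let zp := pvZarray (l ++ r)
  let zs := pvZarray (r ++ l)
  (PySem.List.pyRange 0 n 1).foldl (fun out i =>
    if i < n - 1 - i then
      let L := 2 * i + 1
      if PySem.List.pyGetD zp (2 * n - L) 0 = L then
        out ++ [String.ofList (PySem.List.slice r none (some (n - i)))]
      else out
    else
      let L := 2 * (n - 1 - i) + 1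
      if PySem.List.pyGetD zs (2 * n - L) 0 = L then
        out ++ [String.ofList (PySem.List.slice l none (some (i + 1)))]
      else out) []

-- ===== PRECONDITION & SPEC =====
def Spec_return_possible_candidates (t : String) (out : List String) : Prop := out = return_possible_candidates_alt t
instance (t : String) (out : List String) : Decidable (Spec_return_possible_candidates t out) := by unfold Spec_return_possible_candidates; infer_instance

-- ===== CLAIM (what is proved, stated in full; the proofs are below) =====
def Claim_equal_return_possible_candidates : Prop := ∀ (t : String), Dom_return_possible_candidates t → Spec_return_possible_candidates t (return_possible_candidates t)

-- ===== LEMMAS AND PROOFS =====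

-- length of the longest common prefix of two lists
def pvLcp : List Char → List Char → Nat
  | a :: x, b :: y => if a = b then pvLcp x y + 1 else 0
  | _, _ => 0

theorem pvLcp_le_right : ∀ (x y : List Char), pvLcp x y ≤ y.length := by
  intro x
  induction x with
  | nil => intro y; cases y <;> simp [pvLcp]
  | cons a x ih =>
      intro y
      cases y with
      | nil => simp [pvLcp]
      | cons b y =>
          by_cases h : a = b <;> simp [pvLcp, h]
          exact ih y

theorem pvLcp_take_le : ∀ (x y : List Char) (m : Nat), m ≤ pvLcp x y → x.take m = y.take m := by
  intro x
  induction x with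
  | nil => intro y m hm; cases y <;> simp_all [pvLcp]
  | cons a x ih =>
      intro y m hm
      cases y with
      | nil => simp_all [pvLcp]
      | cons b y =>
          by_cases h : a = b
          · cases m with
            | zero => simp
            | succ m =>
                simp only [pvLcp, h, if_true] at hm
                simp [List.take_succ_cons, h, ih y m (by omega)]
          · simp [pvLcp, h] at hm
            simp [hm]

theorem pvLcp_ge : ∀ (x y : List Char) (m : Nat), x.take m = y.take m → m ≤ x.length → m ≤ y.length → m ≤ pvLcp x y := by
  intro x
  induction x with
  | nil => intro y m _ hx _; simp at hx; omega
  | cons a x ih =>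
      intro y m ht hx hy
      cases y with
      | nil => simp at hy; omega
      | cons b y =>
          cases m with
          | zero => omega
          | succ m =>
              simp only [List.take_succ_cons, List.cons.injEq] at ht
              have : a = b := ht.1
              simp only [pvLcp, this, if_true]
              have := ih y m ht.2 (by simpa using hx) (by simpa using hy)
              omega

theorem pvLcp_get (x y : List Char) (k : Nat) (hk : k < pvLcp x y) : x[k]? = y[k]? := by
  have h := pvLcp_take_le x y (k + 1) (by omega)
  have := congrArg (fun l => l[k]?) h
  simpa [List.getElem?_take] using this

theorem pvGetChar (s : List Char) (m : Nat) (hm : m < s.length) :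
    PySem.List.pyGetD s (m : Int) ' ' = s[m] := by
  rw [PySem.List.pyGetD_natCast, List.getD_eq_getElem _ _ hm]

-- the while loop, started at any sound lower bound, computes pvLcp s (s.drop i)
theorem pvZwhile_spec (s : List Char) (i : Nat) (hi1 : 1 ≤ i) (hin : i < s.length) :
    ∀ (d zi : Nat), pvLcp s (s.drop i) - zi = d → zi ≤ pvLcp s (s.drop i) →
      pvZwhile s (s.length : Int) (i : Int) (zi : Int) = (pvLcp s (s.drop i) : Int) := by
  have hlcp : pvLcp s (s.drop i) ≤ s.length - i := by
    have := pvLcp_le_right s (s.drop i)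
    simpa using this
  intro d
  induction d with
  | zero =>
      intro zi hd hle
      have hz : zi = pvLcp s (s.drop i) := by omega
      rw [pvZwhile, dif_neg]
      · exact_mod_cast congrArg (Nat.cast : Nat → Int) hz
      · rintro ⟨hlt, heq⟩
        have hizn : i + zi < s.length := by exact_mod_cast hlt
        have hzn : zi < s.length := by omega
        rw [pvGetChar s zi hzn] at heq
        rw [show (i : Int) + (zi : Int) = ((i + zi : Nat) : Int) by push_cast; ring,
          pvGetChar s (i + zi) hizn] at heq
        -- the matched character extends the common prefix past its length
        have hge : zi + 1 ≤ pvLcp s (s.drop i) := by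
          apply pvLcp_ge
          · rw [List.take_add_one, List.take_add_one, pvLcp_take_le s (s.drop i) zi hle,
              List.getElem?_eq_getElem hzn, List.getElem?_drop,
              List.getElem?_eq_getElem hizn, heq]
          · omega
          · simp only [List.length_drop]; omega
        omega
  | succ d ih =>
      intro zi hd hle
      have hlt : zi < pvLcp s (s.drop i) := by omega
      have hizn : i + zi < s.length := by omega
      have hchar : s[zi]'(by omega) = s[i + zi]'hizn := by
        have := pvLcp_get s (s.drop i) zi hlt
        rw [List.getElem?_drop, List.getElem?_eq_getElem (show zi < s.length by omega),
          List.getElem?_eq_getElem hizn] at this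
        exact Option.some_injective _ this
      rw [pvZwhile, dif_pos]
      · rw [show (zi : Int) + 1 = ((zi + 1 : Nat) : Int) by omega]
        exact ih (zi + 1) (by omega) (by omega)
      · refine ⟨by omega, ?_⟩
        rw [pvGetChar s zi (by omega),
          show (i : Int) + (zi : Int) = ((i + zi : Nat) : Int) by push_cast; ring,
          pvGetChar s (i + zi) hizn]
        exact hchar

-- the invariant of _zarray's for loop before iteration i
def pvZInv (s : List Char) (i : Nat) (st : List Int × Int × Int) : Prop :=
  st.1.length = s.length ∧
  (∀ j : Nat, 1 ≤ j → j < i → st.1[j]? = some ((pvLcp s (s.drop j) : Nat) : Int)) ∧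
  ∃ ln rn : Nat, st.2.1 = (ln : Int) ∧ st.2.2 = (rn : Int) ∧ ln < i ∧ ln ≤ rn ∧
    rn ≤ s.length ∧ rn ≤ ln + pvLcp s (s.drop ln) ∧ (rn = 0 ∨ 1 ≤ ln)

-- the window shortcut min(r - i, z[i - l]) never overshoots the true z-value
theorem pvZstart_le (s : List Char) (ln i rn : Nat) (h1 : ln < i) (h2 : i < rn)
    (h3 : rn ≤ s.length) (h4 : rn ≤ ln + pvLcp s (s.drop ln)) :
    min (rn - i) (pvLcp s (s.drop (i - ln))) ≤ pvLcp s (s.drop i) := by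
  set m := min (rn - i) (pvLcp s (s.drop (i - ln))) with hm
  have hm1 : m ≤ rn - i := by omega
  have hm2 : m ≤ pvLcp s (s.drop (i - ln)) := by omega
  apply pvLcp_ge
  · -- the first m characters of s and of s.drop i agree, through the window [ln, rn)
    apply List.ext_getElem?
    intro k
    by_cases hkm : k < m
    · rw [List.getElem?_take, List.getElem?_take, if_pos hkm, if_pos hkm, List.getElem?_drop]
      have e1 : s[k]? = s[(i - ln) + k]? := by
        have := pvLcp_get s (s.drop (i - ln)) k (by omega)
        rwa [List.getElem?_drop] at this
      have e2 : s[(i - ln) + k]? = s[i + k]? := by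
        have := pvLcp_get s (s.drop ln) ((i - ln) + k) (by omega)
        rw [List.getElem?_drop] at this
        rw [this]
        congr 1
        omega
      rw [e1, e2]
    · rw [List.getElem?_eq_none, List.getElem?_eq_none] <;> simp [List.length_take] <;> omega
  · omega
  · simp only [List.length_drop]; omega

theorem pvZbody_inv (s : List Char) (i : Nat) (st : List Int × Int × Int)
    (hinv : pvZInv s i st) (hi1 : 1 ≤ i) (hin : i < s.length) :
    pvZInv s (i + 1) (pvZbody s (s.length : Int) st (i : Int)) := by
  obtain ⟨hzlen, hzval, ln, rn, hl, hr, hlni, hlr, hrn, hwin, hpos⟩ := hinv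
  have hlcp : pvLcp s (s.drop i) ≤ s.length - i := by
    have := pvLcp_le_right s (s.drop i)
    simpa using this
  -- the shortcut start value is a sound lower bound
  have hstart : ∃ z0 : Nat,
      (if (i : Int) < st.2.2 then min (st.2.2 - (i : Int)) (PySem.List.pyGetD st.1 ((i : Int) - st.2.1) 0) else 0)
        = (z0 : Int) ∧ z0 ≤ pvLcp s (s.drop i) := by
    by_cases hir : (i : Int) < st.2.2
    · have hirn : i < rn := by rw [hr] at hir; exact_mod_cast hir
      have hjl : (i : Int) - st.2.1 = ((i - ln : Nat) : Int) := by rw [hl]; omega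
      have hlook : PySem.List.pyGetD st.1 ((i - ln : Nat) : Int) 0 = ((pvLcp s (s.drop (i - ln)) : Nat) : Int) := by
        rw [PySem.List.pyGetD_natCast, List.getD_eq_getElem?_getD, hzval (i - ln) (by omega) (by omega)]
        rfl
      refine ⟨min (rn - i) (pvLcp s (s.drop (i - ln))), ?_, pvZstart_le s ln i rn hlni hirn hrn hwin⟩
      rw [if_pos hir, hjl, hlook, hr]
      omega
    · exact ⟨0, by rw [if_neg hir]; rfl, by omega⟩
  obtain ⟨z0, hz0, hz0le⟩ := hstart
  simp only [pvZbody]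
  rw [hz0, pvZwhile_spec s i hi1 hin (pvLcp s (s.drop i) - z0) z0 rfl hz0le]
  rw [PySem.List.pySetD_natCast]
  have hset : ∀ j : Nat, 1 ≤ j → j < i + 1 →
      (st.1.set i ((pvLcp s (s.drop i) : Nat) : Int))[j]? = some ((pvLcp s (s.drop j) : Nat) : Int) := by
    intro j hj1 hji
    rw [List.getElem?_set]
    by_cases hji' : j = i
    · subst hji'
      rw [if_pos rfl, if_pos (by omega)]
    · rw [if_neg (by omega)]
      exact hzval j hj1 (by omega)
  by_cases hext : (i : Int) + ((pvLcp s (s.drop i) : Nat) : Int) > st.2.2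
  · rw [if_pos hext]
    refine ⟨by simpa using hzlen, hset, i, i + pvLcp s (s.drop i), rfl, by push_cast; ring, by omega, by omega, by omega, by omega, by omega⟩
  · rw [if_neg hext]
    exact ⟨by simpa using hzlen, hset, ln, rn, hl, hr, by omega, hlr, hrn, hwin, hpos⟩

theorem pvZfold_inv (s : List Char) : ∀ (d k : Nat) (st : List Int × Int × Int),
    s.length - k = d → 1 ≤ k → pvZInv s k st →
    pvZInv s (max k s.length) ((PySem.List.pyRange (k : Int) (s.length : Int) 1).foldl (pvZbody s (s.length : Int)) st) := by
  intro d
  induction d with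
  | zero =>
      intro k st hd hk1 hinv
      rw [PySem.List.pyRange_one_eq_nil (by exact_mod_cast Nat.le_of_sub_eq_zero hd)]
      simpa [Nat.max_eq_left (by omega : s.length ≤ k)] using hinv
  | succ d ih =>
      intro k st hd hk1 hinv
      have hkn : k < s.length := by omega
      rw [PySem.List.pyRange_one_cons (by exact_mod_cast hkn), List.foldl_cons]
      have hstep := pvZbody_inv s k st hinv hk1 hkn
      have := ih (k + 1) _ (by omega) (by omega) hstep
      rw [show ((k : Int) + 1) = ((k + 1 : Nat) : Int) by push_cast; ring]
      rwa [show max (k + 1) s.length = max k s.length by omega] at this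

theorem pvZarray_spec (s : List Char) (j : Nat) (h1 : 1 ≤ j) (h2 : j < s.length) :
    (pvZarray s)[j]? = some ((pvLcp s (s.drop j) : Nat) : Int) := by
  have hinit : pvZInv s 1 (List.replicate s.length (0 : Int), (0 : Int), (0 : Int)) := by
    refine ⟨by simp, ?_, 0, 0, rfl, rfl, by omega, by omega, by omega, by omega, by omega⟩
    intro j hj1 hji
    omega
  have h := pvZfold_inv s (s.length - 1) 1 _ (by omega) (by omega) hinit
  rw [show ((1 : Nat) : Int) = (1 : Int) by norm_num] at h
  unfold pvZarray
  exact (h.2.1) j h1 (by omega)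

-- an odd window around a center is a palindrome iff its left half equals its reversed right half
theorem pvPal_iff (a b : List Char) (m : Char) (h : a.length = b.length) :
    a ++ m :: b = (a ++ m :: b).reverse ↔ a = b.reverse := by
  have hrev : (a ++ m :: b).reverse = b.reverse ++ m :: a.reverse := by
    simp
  rw [hrev]
  constructor
  · intro he
    exact (List.append_inj he (by simp [h])).1
  · intro he
    rw [he]
    simp

-- z-value of t ++ rev t at 2n - L detects the odd palindromic prefix of length L
theorem pvZcond_first (t : List Char) (k : Nat) (hk : 2 * k + 1 ≤ t.length) :
    pvLcp (t ++ t.reverse) ((t ++ t.reverse).drop (2 * t.length - (2 * k + 1))) = 2 * k + 1 ↔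
      t.take k = ((t.drop (k + 1)).take k).reverse := by
  set n := t.length with hn
  set L := 2 * k + 1 with hL
  have hdrop : (t ++ t.reverse).drop (2 * n - L) = (t.take L).reverse := by
    rw [show 2 * n - L = t.length + (n - L) by omega, List.drop_length_add_append,
      List.drop_reverse]
    congr 2
    omega
  have hlen : ((t ++ t.reverse).drop (2 * n - L)).length = L := by
    rw [hdrop]
    simp only [List.length_reverse, List.length_take]
    omega
  have htake : (t ++ t.reverse).take L = t.take L :=
    List.take_append_of_le_length (by omega)
  -- the odd prefix window split at its center
  have hwin : t.take L = t.take k ++ t[k]'(by omega) :: (t.drop (k + 1)).take k := by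
    rw [show L = k + (k + 1) by omega, List.take_add]
    congr 1
    rw [List.drop_eq_getElem_cons (show k < t.length by omega), List.take_succ_cons]
  have hpal : (t.take L = (t.take L).reverse) ↔ t.take k = ((t.drop (k + 1)).take k).reverse := by
    rw [hwin]
    exact pvPal_iff _ _ _ (by simp only [List.length_take, List.length_drop]; omega)
  rw [← hpal]
  constructor
  · intro he
    have h2 := pvLcp_take_le (t ++ t.reverse) _ L (le_of_eq he.symm)
    rwa [htake, List.take_of_length_le (le_of_eq hlen), hdrop] at h2
  · intro he
    have hge : L ≤ pvLcp (t ++ t.reverse) ((t ++ t.reverse).drop (2 * n - L)) := by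
      apply pvLcp_ge
      · rw [htake, List.take_of_length_le (le_of_eq hlen), hdrop]
        exact he
      · simp only [List.length_append, List.length_reverse]; omega
      · omega
    have hle := pvLcp_le_right (t ++ t.reverse) ((t ++ t.reverse).drop (2 * n - L))
    omega

-- z-value of rev t ++ t at 2n - L detects the odd palindromic suffix of length L
theorem pvZcond_second (t : List Char) (k c : Nat) (hck : c ≤ k) (hkc : k + c + 1 = t.length) :
    pvLcp (t.reverse ++ t) ((t.reverse ++ t).drop (2 * t.length - (2 * c + 1))) = 2 * c + 1 ↔
      (t.drop (k - c)).take c = ((t.drop (k + 1)).take c).reverse := by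
  set n := t.length with hn
  set L := 2 * c + 1 with hL
  have hnL : n - L = k - c := by omega
  have hdrop : (t.reverse ++ t).drop (2 * n - L) = t.drop (k - c) := by
    rw [show 2 * n - L = n + (n - L) by omega, show n + (n - L) = t.reverse.length + (n - L) by simp [hn],
      List.drop_length_add_append, hnL]
  have hlen : ((t.reverse ++ t).drop (2 * n - L)).length = L := by
    rw [hdrop]
    simp only [List.length_drop]
    omega
  have htake : (t.reverse ++ t).take L = (t.drop (k - c)).reverse := by
    rw [List.take_append_of_le_length (by simp only [List.length_reverse]; omega),
      List.take_reverse]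
    congr 2
  -- the odd suffix window split at its center
  have hwin : t.drop (k - c) = (t.drop (k - c)).take c ++ t[k]'(by omega) :: t.drop (k + 1) := by
    conv_lhs => rw [← List.take_append_drop c (t.drop (k - c))]
    congr 1
    rw [List.drop_drop, show k - c + c = k by omega,
      List.drop_eq_getElem_cons (show k < t.length by omega)]
  have hfull : (t.drop (k + 1)).take c = t.drop (k + 1) :=
    List.take_of_length_le (by simp only [List.length_drop]; omega)
  have hpal : (t.drop (k - c) = (t.drop (k - c)).reverse) ↔
      (t.drop (k - c)).take c = (t.drop (k + 1)).reverse := by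
    conv_lhs => rw [hwin]
    exact pvPal_iff _ _ _ (by simp only [List.length_take, List.length_drop]; omega)
  rw [hfull, ← hpal]
  constructor
  · intro he
    have h2 := pvLcp_take_le (t.reverse ++ t) _ L (le_of_eq he.symm)
    rw [htake, List.take_of_length_le (le_of_eq hlen), hdrop] at h2
    exact h2.symm
  · intro he
    have hge : L ≤ pvLcp (t.reverse ++ t) ((t.reverse ++ t).drop (2 * n - L)) := by
      apply pvLcp_ge
      · rw [htake, List.take_of_length_le (le_of_eq hlen), hdrop]
        exact he.symm
      · simp only [List.length_append, List.length_reverse]; omega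
      · omega
    have hle := pvLcp_le_right (t.reverse ++ t) ((t.reverse ++ t).drop (2 * n - L))
    omega

-- per-index agreement of the two loop bodies, then the two folds agree
theorem return_possible_candidates_spec : Claim_equal_return_possible_candidates := by
  intro t _
  unfold Spec_return_possible_candidates return_possible_candidates return_possible_candidates_alt
  simp only []
  apply PySem.List.foldl_congr_mem
  intro acc i hi
  rw [PySem.List.mem_pyRange_one] at hi
  obtain ⟨h0, hn⟩ := hi
  set l := t.toList with hl
  obtain ⟨k, rfl⟩ : ∃ k : Nat, i = (k : Int) := ⟨i.toNat, by omega⟩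
  have hk : k < l.length := by exact_mod_cast hn
  set n := l.length with hn'
  have hadd1 : (k : Int) + 1 = ((k + 1 : Nat) : Int) := by omega
  by_cases hbr : (k : Int) < (n : Int) - 1 - (k : Int)
  · -- center in the left half: check = k, window = t[:2k+1]
    have hk2 : 2 * k + 1 ≤ n := by omega
    have hcheck : min ((k : Int) - 0) ((n : Int) - 1 - (k : Int)) = ((k : Nat) : Int) := by omega
    have hleft : PySem.List.slice l (some ((k : Int) - (k : Int))) (some (k : Int)) = l.take k := by
      rw [show (k : Int) - (k : Int) = ((0 : Nat) : Int) by omega, PySem.List.slice_natCast]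
      simp
    have hadd2 : (k : Int) + 1 + (k : Int) = ((k + 1 + k : Nat) : Int) := by omega
    have hright : PySem.List.slice l (some ((k : Int) + 1)) (some ((k : Int) + 1 + (k : Int)))
        = (l.drop (k + 1)).take k := by
      rw [hadd2, hadd1, PySem.List.slice_natCast]
      congr 1
      omega
    have hp : 2 * ((n : Nat) : Int) - (2 * (k : Int) + 1) = ((2 * n - (2 * k + 1) : Nat) : Int) := by
      omega
    have hgz : PySem.List.pyGetD (pvZarray (l ++ l.reverse)) ((2 * n - (2 * k + 1) : Nat) : Int) 0
        = ((pvLcp (l ++ l.reverse) ((l ++ l.reverse).drop (2 * n - (2 * k + 1))) : Nat) : Int) := by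
      rw [PySem.List.pyGetD_natCast, List.getD_eq_getElem?_getD,
        pvZarray_spec (l ++ l.reverse) (2 * n - (2 * k + 1)) (by omega)
          (by simp only [List.length_append, List.length_reverse, ← hn']; omega)]
      rfl
    have hcond : (PySem.List.pyGetD (pvZarray (l ++ l.reverse)) (2 * ((n : Nat) : Int) - (2 * (k : Int) + 1)) 0
        = 2 * (k : Int) + 1) ↔ l.take k = ((l.drop (k + 1)).take k).reverse := by
      rw [hp, hgz, show 2 * (k : Int) + 1 = ((2 * k + 1 : Nat) : Int) by push_cast; ring,
        Nat.cast_inj]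
      exact pvZcond_first l k hk2
    rw [hcheck, hleft, hright, if_pos hbr]
    by_cases htest : l.take k = ((l.drop (k + 1)).take k).reverse
    · rw [if_pos htest, if_pos (hcond.mpr htest), if_pos (show (n : Int) - 1 - (k : Int) > (k : Int) - 0 by omega)]
      congr 2
      -- rev(t[k:n]) = rev(t)[:n-k]
      have h1 : PySem.List.slice l (some (k : Int)) (some (n : Int)) = l.drop k := by
        rw [PySem.List.slice_natCast]
        exact List.take_of_length_le (by simp only [List.length_drop]; omega)
      have h2 : (n : Int) - (k : Int) = ((n - k : Nat) : Int) := by omega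
      have h3 : l.length - (n - k) = k := by omega
      rw [h1, h2, PySem.List.slice_to_natCast, List.take_reverse, h3]
    · rw [if_neg htest, if_neg (fun h => htest (hcond.mp h))]
  · -- center in the right half: check = n-1-k, window = t[n-2(n-1-k)-1:]
    set c := n - 1 - k with hc
    have hck : c ≤ k := by omega
    have hkc : k + c + 1 = n := by omega
    have hcheck : min ((k : Int) - 0) ((n : Int) - 1 - (k : Int)) = ((c : Nat) : Int) := by
      simp only [hc]; omega
    have hsub : (k : Int) - ((c : Nat) : Int) = ((k - c : Nat) : Int) := by omega
    have hleft : PySem.List.slice l (some ((k : Int) - ((c : Nat) : Int))) (some (k : Int))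
        = (l.drop (k - c)).take c := by
      rw [hsub, PySem.List.slice_natCast]
      congr 1
      omega
    have hadd2 : (k : Int) + 1 + ((c : Nat) : Int) = ((k + 1 + c : Nat) : Int) := by omega
    have hright : PySem.List.slice l (some ((k : Int) + 1)) (some ((k : Int) + 1 + ((c : Nat) : Int)))
        = (l.drop (k + 1)).take c := by
      rw [hadd2, hadd1, PySem.List.slice_natCast]
      congr 1
      omega
    have hLc : 2 * (((n : Nat) : Int) - 1 - (k : Int)) + 1 = ((2 * c + 1 : Nat) : Int) := by
      simp only [hc]; omega
    have hp : 2 * ((n : Nat) : Int) - ((2 * c + 1 : Nat) : Int) = ((2 * n - (2 * c + 1) : Nat) : Int) := by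
      omega
    have hgz : PySem.List.pyGetD (pvZarray (l.reverse ++ l)) ((2 * n - (2 * c + 1) : Nat) : Int) 0
        = ((pvLcp (l.reverse ++ l) ((l.reverse ++ l).drop (2 * n - (2 * c + 1))) : Nat) : Int) := by
      rw [PySem.List.pyGetD_natCast, List.getD_eq_getElem?_getD,
        pvZarray_spec (l.reverse ++ l) (2 * n - (2 * c + 1)) (by omega)
          (by simp only [List.length_append, List.length_reverse, ← hn']; omega)]
      rfl
    have hcond : (PySem.List.pyGetD (pvZarray (l.reverse ++ l)) (2 * ((n : Nat) : Int) - (2 * (((n : Nat) : Int) - 1 - (k : Int)) + 1)) 0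
        = 2 * (((n : Nat) : Int) - 1 - (k : Int)) + 1) ↔
        (l.drop (k - c)).take c = ((l.drop (k + 1)).take c).reverse := by
      rw [hLc, hp, hgz, Nat.cast_inj]
      exact pvZcond_second l k c hck hkc
    rw [hcheck, hleft, hright, if_neg hbr]
    by_cases htest : (l.drop (k - c)).take c = ((l.drop (k + 1)).take c).reverse
    · rw [if_pos htest, if_pos (hcond.mpr htest),
        if_neg (show ¬((n : Int) - 1 - (k : Int) > (k : Int) - 0) by omega)]
      -- t[0:k+1] = t[:k+1] definitionally (slice with start 0)
      congr 2
    · rw [if_neg htest, if_neg (fun h => htest (hcond.mp h))]
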